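-- pv_equiv track=rewrite | github.com/TimFanelle/AdventOfCode | 2023/22-partOne.py | determineIssues
-- ===== SOURCE A (Python) =====
-- def determineIssues(block, finalizedBlocks):
-- 	if block[0][2] < 1:
-- 		return True
-- 	for item in finalizedBlocks:
-- 		if item[1][2] >= block[0][2] and item[0][2] <= block[1][2]:
-- 			a = []
-- 			for x in range(item[0][0], item[1][0]+1):
-- 				for y in range(item[0][1], item[1][1]+1):
-- 					a.append((x,y))
-- 			a = set(a)
-- 			b = []
-- 			for x in range(block[0][0], block[1][0]+1):
-- 				for y in range(block[0][1], block[1][1]+1):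
-- 					b.append((x,y))
-- 			b = set(b)
-- 			if len(b.intersection(a)) > 0:
-- 				return True
-- 	return False
-- ===== SOURCE B (Python) =====
-- def determineIssues(block, finalizedBlocks):
--     # O(1) rectangle-overlap test per finalized block instead of materialising both footprints.
--     if block[0][2] < 1:
--         return True
--     (bx0, by0, bz0), (bx1, by1, bz1) = block[0], block[1]
--     return any(
--         item[1][2] >= bz0 and item[0][2] <= bz1
--         and max(item[0][0], bx0) <= min(item[1][0], bx1)
--         and max(item[0][1], by0) <= min(item[1][1], by1)
--         for item in finalizedBlocks
--     )
-- ===== Notes on version B (the rewrite author's own statement) =====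
-- stated objective: faster
-- what changed: Replaces the per-item materialisation of both footprints as point sets and their intersection with a constant-time axis-aligned interval-overlap test (max of lows <= min of highs in x and y).
-- outside the precondition, e.g. on determineIssues([(2, 0, 2)], [[(0, 0, 0), (3, 2, 0), (0, 2, 2)]]): A returns False, B raises IndexError; on determineIssues([(0, 0, 1), (0, 0, 1)], [[(0, 0, 1), (0, 0, 1)], [(9, 9, 9)]]): A returns True, B returns True
import Mathlib
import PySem

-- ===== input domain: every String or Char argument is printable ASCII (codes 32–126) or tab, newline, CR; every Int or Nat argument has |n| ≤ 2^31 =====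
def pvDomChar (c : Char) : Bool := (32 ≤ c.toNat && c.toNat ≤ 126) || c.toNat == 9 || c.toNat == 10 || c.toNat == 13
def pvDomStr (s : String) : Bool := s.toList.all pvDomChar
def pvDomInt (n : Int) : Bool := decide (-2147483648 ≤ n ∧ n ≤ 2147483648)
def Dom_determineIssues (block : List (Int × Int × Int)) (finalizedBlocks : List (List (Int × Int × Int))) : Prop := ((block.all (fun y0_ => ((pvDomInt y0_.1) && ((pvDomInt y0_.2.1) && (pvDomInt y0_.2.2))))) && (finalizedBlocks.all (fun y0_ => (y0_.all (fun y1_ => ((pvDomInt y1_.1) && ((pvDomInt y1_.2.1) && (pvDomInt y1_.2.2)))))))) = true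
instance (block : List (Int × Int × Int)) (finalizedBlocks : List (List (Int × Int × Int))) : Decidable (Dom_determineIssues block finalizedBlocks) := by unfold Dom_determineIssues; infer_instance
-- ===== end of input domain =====

-- B replaces A's per-item point-set footprints and set intersection by a constant-time
-- interval-overlap test per finalized block (objective: faster, asymptotically).

-- ===== PORT A =====
def pvDflt : Int × Int × Int := (0, 0, 0)

-- the nested loops building the footprint point list, then set(...)
def pvAreaA (p q : Int × Int × Int) : PySem.Set (Int × Int) :=
  PySem.Set.ofList
    ((PySem.List.pyRange p.1 (q.1 + 1) 1).foldl
      (fun acc x => (PySem.List.pyRange p.2.1 (q.2.1 + 1) 1).foldl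
        (fun acc2 y => acc2 ++ [(x, y)]) acc) [])

def pvLoopA (block : List (Int × Int × Int)) : List (List (Int × Int × Int)) → Bool
  | [] => false
  | item :: rest =>
    let b0 := (PySem.List.pyGet? block 0).getD pvDflt
    let b1 := (PySem.List.pyGet? block 1).getD pvDflt
    let i0 := (PySem.List.pyGet? item 0).getD pvDflt
    let i1 := (PySem.List.pyGet? item 1).getD pvDflt
    if i1.2.2 ≥ b0.2.2 && i0.2.2 ≤ b1.2.2 then
      let a := pvAreaA i0 i1
      let b := pvAreaA b0 b1
      if PySem.Set.len (PySem.Set.inter b a) > 0 then true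
      else pvLoopA block rest
    else pvLoopA block rest

def determineIssues (block : List (Int × Int × Int)) (finalizedBlocks : List (List (Int × Int × Int))) : Bool :=
  let b0 := (PySem.List.pyGet? block 0).getD pvDflt
  if b0.2.2 < 1 then true
  else pvLoopA block finalizedBlocks

-- ===== PORT B =====
def determineIssues_alt (block : List (Int × Int × Int)) (finalizedBlocks : List (List (Int × Int × Int))) : Bool :=
  match block with
  | [] => false      -- unreachable under Pre_
  | b0 :: rest =>
    if b0.2.2 < 1 then true
    else
      match rest with
      | [] => false  -- unreachable under Pre_
      | b1 :: _ =>
        finalizedBlocks.any (fun item =>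
          match item with
          | i0 :: i1 :: _ =>
            decide (i1.2.2 ≥ b0.2.2 ∧ i0.2.2 ≤ b1.2.2 ∧
              max i0.1 b0.1 ≤ min i1.1 b1.1 ∧
              max i0.2.1 b0.2.1 ≤ min i1.2.1 b1.2.1)
          | _ => false)  -- unreachable under Pre_

-- ===== PRECONDITION & SPEC =====
-- Pre_ excludes inputs on which indexing can raise IndexError in A or in B: a block shorter than 2
-- without the early z<1 return (A may still return False there if no item z-overlaps, since it never
-- touches block[1], but B destructures both endpoints up front and raises), or a finalized item shorter
-- than 2 (A returns on such inputs only by exiting before reaching the malformed item; B does the same).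
def Pre_determineIssues (block : List (Int × Int × Int)) (finalizedBlocks : List (List (Int × Int × Int))) : Prop :=
  (block ≠ [] ∧ block.headI.2.2 < 1) ∨
  (2 ≤ block.length ∧ ∀ item ∈ finalizedBlocks, 2 ≤ item.length)
instance (block : List (Int × Int × Int)) (finalizedBlocks : List (List (Int × Int × Int))) : Decidable (Pre_determineIssues block finalizedBlocks) := by unfold Pre_determineIssues; infer_instance

def pvWitness_determineIssues : (List (Int × Int × Int)) × (List (List (Int × Int × Int))) :=
  ([(0, 0, 1), (2, 2, 3)], [[(1, 1, 0), (3, 3, 2)]])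

def Spec_determineIssues (block : List (Int × Int × Int)) (finalizedBlocks : List (List (Int × Int × Int))) (out : Bool) : Prop := out = determineIssues_alt block finalizedBlocks
instance (block : List (Int × Int × Int)) (finalizedBlocks : List (List (Int × Int × Int))) (out : Bool) : Decidable (Spec_determineIssues block finalizedBlocks out) := by unfold Spec_determineIssues; infer_instance

-- ===== CLAIM (what is proved, stated in full; the proofs are below) =====
def Claim_equal_determineIssues : Prop := ∀ (block : List (Int × Int × Int)) (finalizedBlocks : List (List (Int × Int × Int))), Dom_determineIssues block finalizedBlocks → Pre_determineIssues block finalizedBlocks → Spec_determineIssues block finalizedBlocks (determineIssues block finalizedBlocks)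

-- ===== LEMMAS AND PROOFS =====

theorem mem_pvAreaA (p q : Int × Int × Int) (x y : Int) :
    (x, y) ∈ pvAreaA p q ↔ (p.1 ≤ x ∧ x ≤ q.1 ∧ p.2.1 ≤ y ∧ y ≤ q.2.1) := by
  unfold pvAreaA
  simp only [PySem.List.foldl_append_singleton_eq_map]
  rw [show (fun (acc : List (Int × Int)) (x : Int) =>
        acc ++ (PySem.List.pyRange p.2.1 (q.2.1 + 1) 1).map (fun y => (x, y)))
      = (fun acc x => acc ++ (fun x => (PySem.List.pyRange p.2.1 (q.2.1 + 1) 1).map (fun y => (x, y))) x) from rfl,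
    PySem.List.foldl_append_eq_flatMap]
  simp only [PySem.Set.mem_ofList, List.nil_append, List.mem_flatMap, List.mem_map,
    PySem.List.mem_pyRange_one, Prod.mk.injEq]
  constructor
  · rintro ⟨a, ⟨h1, h2⟩, b, ⟨h3, h4⟩, rfl, rfl⟩; omega
  · rintro ⟨h1, h2, h3, h4⟩; exact ⟨x, ⟨h1, by omega⟩, y, ⟨h3, by omega⟩, rfl, rfl⟩

theorem inter_pos_iff (b0 b1 i0 i1 : Int × Int × Int) :
    (PySem.Set.len (PySem.Set.inter (pvAreaA b0 b1) (pvAreaA i0 i1)) > 0) ↔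
    (max i0.1 b0.1 ≤ min i1.1 b1.1 ∧ max i0.2.1 b0.2.1 ≤ min i1.2.1 b1.2.1) := by
  have hlen : PySem.Set.len (PySem.Set.inter (pvAreaA b0 b1) (pvAreaA i0 i1)) > 0 ↔
      ∃ p, p ∈ PySem.Set.inter (pvAreaA b0 b1) (pvAreaA i0 i1) := by
    simp [PySem.Set.len, List.length_pos_iff_exists_mem]
  rw [hlen]
  constructor
  · rintro ⟨⟨x, y⟩, hp⟩
    rw [PySem.Set.mem_inter, mem_pvAreaA, mem_pvAreaA] at hp
    omega
  · rintro ⟨h1, h2⟩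
    refine ⟨(max i0.1 b0.1, max i0.2.1 b0.2.1), ?_⟩
    rw [PySem.Set.mem_inter, mem_pvAreaA, mem_pvAreaA]
    omega

theorem pyGet0 {α : Type} (d x : α) (xs : List α) :
    (PySem.List.pyGet? (x :: xs) 0).getD d = x := by
  simp [PySem.List.pyGet?, PySem.List.pyIdx?]

theorem pyGet1 {α : Type} (d x y : α) (xs : List α) :
    (PySem.List.pyGet? (x :: y :: xs) 1).getD d = y := by
  simp [PySem.List.pyGet?, PySem.List.pyIdx?]

theorem pvLoopA_eq (b0 b1 : Int × Int × Int) (t : List (Int × Int × Int))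
    (fbs : List (List (Int × Int × Int))) (h : ∀ item ∈ fbs, 2 ≤ item.length) :
    pvLoopA (b0 :: b1 :: t) fbs = fbs.any (fun item =>
      match item with
      | i0 :: i1 :: _ =>
        decide (i1.2.2 ≥ b0.2.2 ∧ i0.2.2 ≤ b1.2.2 ∧
          max i0.1 b0.1 ≤ min i1.1 b1.1 ∧
          max i0.2.1 b0.2.1 ≤ min i1.2.1 b1.2.1)
      | _ => false) := by
  induction fbs with
  | nil => rfl
  | cons item rest ih =>
    have hrest : ∀ it ∈ rest, 2 ≤ it.length := fun it hit => h it (List.mem_cons_of_mem _ hit)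
    obtain ⟨i0, i1, s, rfl⟩ : ∃ i0 i1 s, item = i0 :: i1 :: s := by
      have := h item List.mem_cons_self
      match item with
      | i0 :: i1 :: s => exact ⟨i0, i1, s, rfl⟩
    simp only [pvLoopA, pyGet0, pyGet1, List.any_cons]
    rw [ih hrest]
    by_cases hz : i1.2.2 ≥ b0.2.2 ∧ i0.2.2 ≤ b1.2.2
    · rw [if_pos (by simp [hz.1, hz.2])]
      by_cases hov : max i0.1 b0.1 ≤ min i1.1 b1.1 ∧ max i0.2.1 b0.2.1 ≤ min i1.2.1 b1.2.1
      · rw [if_pos ((inter_pos_iff b0 b1 i0 i1).2 hov)]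
        simp [hz.1, hz.2, hov.1, hov.2]
      · rw [if_neg (fun hc => hov ((inter_pos_iff b0 b1 i0 i1).1 hc))]
        have hf : decide (i1.2.2 ≥ b0.2.2 ∧ i0.2.2 ≤ b1.2.2 ∧
            max i0.1 b0.1 ≤ min i1.1 b1.1 ∧ max i0.2.1 b0.2.1 ≤ min i1.2.1 b1.2.1) = false := by
          simp only [decide_eq_false_iff_not]; tauto
        rw [hf, Bool.false_or]
    · rw [if_neg (by simp only [Bool.and_eq_true, decide_eq_true_eq]; tauto)]
      have hf : decide (i1.2.2 ≥ b0.2.2 ∧ i0.2.2 ≤ b1.2.2 ∧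
          max i0.1 b0.1 ≤ min i1.1 b1.1 ∧ max i0.2.1 b0.2.1 ≤ min i1.2.1 b1.2.1) = false := by
        simp only [decide_eq_false_iff_not]; tauto
      rw [hf, Bool.false_or]

-- ===== VERDICT (by name: the statement is the Claim_ definition above) =====
theorem determineIssues_spec : Claim_equal_determineIssues := by
  intro block fbs _hdom hpre
  unfold Spec_determineIssues determineIssues determineIssues_alt
  rcases hpre with ⟨hne, hz⟩ | ⟨hlen, hitems⟩
  · match block with
    | b0 :: rest =>
      simp only [pyGet0]
      simp only [List.headI] at hz
      rw [if_pos hz]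
      match rest with
      | [] => rw [if_pos hz]
      | b1 :: t => rw [if_pos hz]
  · match block with
    | b0 :: b1 :: t =>
      simp only [pyGet0]
      by_cases hz : b0.2.2 < 1
      · rw [if_pos hz, if_pos hz]
      · rw [if_neg hz, if_neg hz]
        exact pvLoopA_eq b0 b1 t fbs hitems
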